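-- pv_equiv track=rewrite | github.com/RSET-CSE-DEPARTMENT/RSET2022-26-S8-Alpha | Group-12/Backend/main.py | _normalize_member_key
-- ===== SOURCE A (Python) =====
-- def _normalize_member_key(name):
--     lowered = (name or "").strip().lower()
--     normalized = []
--     previous_was_dash = False
--
--     for char in lowered:
--         if char.isalnum():
--             normalized.append(char)
--             previous_was_dash = False
--         elif not previous_was_dash:
--             normalized.append("-")
--             previous_was_dash = True
--
--     return "".join(normalized).strip("-")
-- ===== SOURCE B (Python) =====
-- def _normalize_member_key(name):
--     lowered = (name or "").strip().lower()
--     parts = []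
--     i, n = 0, len(lowered)
--     while i < n:
--         j = i
--         while j < n and lowered[j].isalnum() == lowered[i].isalnum():
--             j += 1
--         parts.append(lowered[i:j] if lowered[i].isalnum() else "-")
--         i = j
--     return "".join(parts).strip("-")
-- ===== Notes on version B (the rewrite author's own statement) =====
-- stated objective: alternative
-- what changed: B replaces A's per-character loop with a previous_was_dash flag by an index-based scan over maximal runs: each alnum run is appended whole as a slice and each non-alnum run becomes a single dash.
import Mathlib
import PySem

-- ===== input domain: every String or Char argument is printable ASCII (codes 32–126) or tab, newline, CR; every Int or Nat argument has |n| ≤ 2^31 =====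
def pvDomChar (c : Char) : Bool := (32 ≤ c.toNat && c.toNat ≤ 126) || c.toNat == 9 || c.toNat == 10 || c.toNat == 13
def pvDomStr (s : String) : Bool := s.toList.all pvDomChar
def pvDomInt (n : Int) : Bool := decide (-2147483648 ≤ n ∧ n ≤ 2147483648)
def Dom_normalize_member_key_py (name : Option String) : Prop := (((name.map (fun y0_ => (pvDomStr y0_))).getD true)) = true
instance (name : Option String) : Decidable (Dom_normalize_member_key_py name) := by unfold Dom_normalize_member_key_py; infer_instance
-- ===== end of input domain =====

-- B replaces A's per-character loop with a dash flag by a scan over maximal alnum / non-alnum runs (alternative decomposition, same cost).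

-- ===== PORT A =====
-- the loop body: state = (accumulated chars, previous_was_dash)
def pvStepA (st : List Char × Bool) (ch : Char) : List Char × Bool :=
  if PySem.Chars.isalnum ch then (st.1 ++ [ch], false)
  else if !st.2 then (st.1 ++ ['-'], true)
  else st

def normalize_member_key_py (name : Option String) : String :=
  let lowered := PySem.Str.lower (PySem.Str.strip (name.getD ""))
  let res := lowered.toList.foldl pvStepA ([], false)
  PySem.Str.stripChars (String.ofList res.1) "-"

-- ===== PORT B =====
-- B's outer while loop: each step consumes one maximal run (inner while = takeWhile over the run)
def pvRuns (l : List Char) : List Char :=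
  match l with
  | [] => []
  | c :: cs =>
      let run := cs.takeWhile (fun d => PySem.Chars.isalnum d == PySem.Chars.isalnum c)
      let rest := cs.dropWhile (fun d => PySem.Chars.isalnum d == PySem.Chars.isalnum c)
      (if PySem.Chars.isalnum c then c :: run else ['-']) ++ pvRuns rest
termination_by l.length
decreasing_by
  simpa using Nat.lt_succ_of_le (List.length_dropWhile_le _ _)

def normalize_member_key_py_alt (name : Option String) : String :=
  let lowered := PySem.Str.lower (PySem.Str.strip (name.getD ""))
  PySem.Str.stripChars (String.ofList (pvRuns lowered.toList)) "-"

-- ===== PRECONDITION & SPEC =====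
def Spec_normalize_member_key_py (name : Option String) (out : String) : Prop := out = normalize_member_key_py_alt name
instance (name : Option String) (out : String) : Decidable (Spec_normalize_member_key_py name out) := by unfold Spec_normalize_member_key_py; infer_instance

-- ===== CLAIM (what is proved, stated in full; the proofs are below) =====
def Claim_equal_normalize_member_key_py : Prop := ∀ (name : Option String), Dom_normalize_member_key_py name → Spec_normalize_member_key_py name (normalize_member_key_py name)

-- ===== LEMMAS AND PROOFS =====

-- what A's loop emits after the already-accumulated prefix, given the current flag
def pvEmit (l : List Char) (prev : Bool) : List Char :=
  match l with
  | [] => []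
  | c :: cs =>
      if PySem.Chars.isalnum c then c :: pvEmit cs false
      else if prev then pvEmit cs true
      else '-' :: pvEmit cs true

theorem pvFoldA_eq (l : List Char) : ∀ (acc : List Char) (prev : Bool),
    (l.foldl pvStepA (acc, prev)).1 = acc ++ pvEmit l prev := by
  induction l with
  | nil => intro acc prev; simp [pvEmit]
  | cons c cs ih =>
      intro acc prev
      by_cases h : PySem.Chars.isalnum c = true
      · simp [List.foldl, pvStepA, h, pvEmit, ih]
      · have h' : PySem.Chars.isalnum c = false := by simpa using h
        cases prev <;>
          simp [List.foldl, pvStepA, h', pvEmit, ih]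

theorem pvRuns_cons_alnum (c : Char) (cs : List Char) (h : PySem.Chars.isalnum c = true) :
    pvRuns (c :: cs) = c :: pvRuns cs := by
  rw [pvRuns]
  have hp : (fun d => PySem.Chars.isalnum d == PySem.Chars.isalnum c)
      = (fun d => PySem.Chars.isalnum d) := by funext d; simp [h]
  simp only [hp, h, if_pos, List.cons_append, List.cons.injEq, true_and]
  cases cs with
  | nil => simp [pvRuns]
  | cons d ds =>
      by_cases hd : PySem.Chars.isalnum d = true
      · conv_rhs => rw [pvRuns]
        have hp' : (fun e => PySem.Chars.isalnum e == PySem.Chars.isalnum d)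
            = (fun e => PySem.Chars.isalnum e) := by funext e; simp [hd]
        simp [List.takeWhile_cons, List.dropWhile_cons, hd, hp']
      · have hd' : PySem.Chars.isalnum d = false := by simpa using hd
        simp [List.takeWhile_cons, List.dropWhile_cons, hd']

theorem pvRuns_cons_not_alnum (c : Char) (cs : List Char) (h : PySem.Chars.isalnum c = false) :
    pvRuns (c :: cs) = '-' :: pvRuns (cs.dropWhile (fun d => !PySem.Chars.isalnum d)) := by
  rw [pvRuns]
  have hp : (fun d => PySem.Chars.isalnum d == PySem.Chars.isalnum c)
      = (fun d => !PySem.Chars.isalnum d) := by funext d; simp [h]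
  simp [hp, h]

theorem pvEmit_eq_runs (l : List Char) :
    pvEmit l false = pvRuns l ∧
    pvEmit l true = pvRuns (l.dropWhile (fun d => !PySem.Chars.isalnum d)) := by
  induction l with
  | nil => simp [pvEmit, pvRuns]
  | cons c cs ih =>
      by_cases h : PySem.Chars.isalnum c = true
      · constructor
        · rw [pvRuns_cons_alnum c cs h]; simp [pvEmit, h, ih.1]
        · rw [List.dropWhile_cons]
          simp only [h, Bool.not_true, Bool.false_eq_true, if_false]
          rw [pvRuns_cons_alnum c cs h]
          simp [pvEmit, h, ih.1]
      · have h' : PySem.Chars.isalnum c = false := by simpa using h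
        constructor
        · rw [pvRuns_cons_not_alnum c cs h']; simp [pvEmit, h', ih.2]
        · rw [List.dropWhile_cons]
          simp only [h', Bool.not_false, if_true]
          simp [pvEmit, h', ih.2]

-- ===== VERDICT (by name: the statement is the Claim_ definition above) =====
theorem normalize_member_key_py_spec : Claim_equal_normalize_member_key_py := by
  intro name _
  unfold Spec_normalize_member_key_py normalize_member_key_py normalize_member_key_py_alt
  simp only [pvFoldA_eq, List.nil_append, (pvEmit_eq_runs _).1]
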